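-- pv_equiv track=rewrite | github.com/leanprover-community/mathlib4 | find_unmatched_backticks.py | _has_unmatched_backticks
-- ===== SOURCE A (Python) =====
-- def _has_unmatched_backticks(body: str) -> bool:
--     """Return True if `body` contains an unmatched Markdown backtick delimiter."""
--     open_delim: int | None = None
--     i = 0
--     n = len(body)
--     while i < n:
--         if body[i] != '`':
--             i += 1
--             continue
--         j = i + 1
--         while j < n and body[j] == '`':
--             j += 1
--         run_len = j - i
--         if open_delim is None:
--             open_delim = run_len
--         elif run_len == open_delim:
--             open_delim = None
--         else:
--             # Backticks inside a code span that don't match the opening delimiter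
--             # are literal text, so we ignore them.
--             pass
--         i = j
--     return open_delim is not None
-- ===== SOURCE B (Python) =====
-- def _has_unmatched_backticks(body: str) -> bool:
--     """Mask-and-split tokenization, then greedy skip-to-closer matching:
--     repeatedly search the remaining run lengths for one equal to the current
--     opener and jump past it; an opener with no closer means unmatched."""
--     masked = ''.join(c if c == '`' else ' ' for c in body)
--     tokens = [len(t) for t in masked.split()]
--     while tokens:
--         rest = tokens[1:]
--         if tokens[0] not in rest:
--             return True
--         tokens = rest[rest.index(tokens[0]) + 1:]
--     return False
-- ===== Notes on version B (the rewrite author's own statement) =====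
-- stated objective: alternative
-- what changed: A is a stateful single scan toggling an open_delim state machine over the characters; B first tokenizes by masking non-backticks to spaces and str.split()-ing into run lengths, then matches by greedy skip-to-closer: search the remainder for a run equal to the current opener with list.index and drop everything through it, reporting unmatched when the search fails.
import Mathlib
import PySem

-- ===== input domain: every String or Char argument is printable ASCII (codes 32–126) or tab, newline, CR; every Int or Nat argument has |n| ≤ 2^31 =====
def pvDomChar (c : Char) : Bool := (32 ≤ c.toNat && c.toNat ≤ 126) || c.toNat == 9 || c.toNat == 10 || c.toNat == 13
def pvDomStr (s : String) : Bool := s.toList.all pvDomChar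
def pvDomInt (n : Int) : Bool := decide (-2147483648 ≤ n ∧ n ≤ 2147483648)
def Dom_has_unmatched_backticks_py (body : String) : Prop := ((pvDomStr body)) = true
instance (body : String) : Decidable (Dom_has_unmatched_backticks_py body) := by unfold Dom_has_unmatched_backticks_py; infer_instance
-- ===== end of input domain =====

-- B replaces A's single-state toggle scan by mask-and-split tokenization followed by
-- greedy skip-to-closer matching (search for the closing run, drop through it); same
-- result, a genuinely different matching strategy ("alternative", no speed claim).

-- ===== PORT A =====
-- inner while: 'while j < n and body[j] == '`': j += 1', carrying run_len so far
def pvARun : List Char → Nat → Nat × List Char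
  | [], k => (k, [])
  | c :: rest, k => if c = '`' then pvARun rest (k + 1) else (k, c :: rest)

theorem pvARun_len : ∀ (l : List Char) (k : Nat), (pvARun l k).2.length ≤ l.length := by
  intro l
  induction l with
  | nil => intro k; simp [pvARun]
  | cons c rest ih =>
    intro k
    simp only [pvARun]
    split
    · exact Nat.le_trans (ih (k + 1)) (Nat.le_succ _)
    · simp

-- outer while over the remaining characters, carrying open_delim
def pvALoop : List Char → Option Nat → Option Nat
  | [], od => od
  | c :: rest, od =>
    if c ≠ '`' then pvALoop rest od
    else
      let p := pvARun rest 1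
      let od' := match od with
        | none => some p.1
        | some d => if p.1 = d then none else some d
      pvALoop p.2 od'
termination_by l _ => l.length
decreasing_by
  · simp
  · simp only [List.length_cons]
    exact Nat.lt_succ_of_le (pvARun_len rest 1)

def has_unmatched_backticks_py (body : String) : Bool :=
  (pvALoop body.toList none).isSome

-- ===== PORT B =====
-- masked = ''.join(c if c == '`' else ' ' for c in body)  (a join of single chars is the list of them)
def pvMask (l : List Char) : List Char := l.map (fun c => if c = '`' then c else ' ')

-- tokens = [len(t) for t in masked.split()]
def pvTokens (body : String) : List Int :=
  (PySem.Str.split₀ (String.ofList (pvMask body.toList))).map PySem.Str.len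

theorem pvSliceFromLen {α : Type} (xs : List α) (a : Int) :
    (PySem.List.slice xs (some a) none).length ≤ xs.length := by
  rw [PySem.List.slice_some_none]; simp

-- the while loop: 'tokens[0] not in rest' / 'rest.index(tokens[0])' is the one index? search
def pvBLoop : List Int → Bool
  | [] => false
  | t :: rest =>
    match PySem.List.index? rest t with
    | none => true                                            -- tokens[0] not in rest
    | some k => pvBLoop (PySem.List.slice rest (some ((k : Int) + 1)) none)   -- rest[rest.index(tokens[0])+1:]
termination_by l => l.length
decreasing_by
  simp only [List.length_cons]
  exact Nat.lt_succ_of_le (pvSliceFromLen _ _)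

def has_unmatched_backticks_py_alt (body : String) : Bool :=
  pvBLoop (pvTokens body)

-- ===== PRECONDITION & SPEC =====
def Spec_has_unmatched_backticks_py (body : String) (out : Bool) : Prop := out = has_unmatched_backticks_py_alt body
instance (body : String) (out : Bool) : Decidable (Spec_has_unmatched_backticks_py body out) := by unfold Spec_has_unmatched_backticks_py; infer_instance

-- ===== CLAIM (what is proved, stated in full; the proofs are below) =====
def Claim_equal_has_unmatched_backticks_py : Prop := ∀ (body : String), Dom_has_unmatched_backticks_py body → Spec_has_unmatched_backticks_py body (has_unmatched_backticks_py body)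

-- ===== LEMMAS AND PROOFS =====

-- run-length table of maximal backtick runs (proof-only common intermediate)
def pvRuns : List Char → Nat → List Nat
  | [], cur => if cur ≠ 0 then [cur] else []
  | c :: rest, cur =>
    if c = '`' then pvRuns rest (cur + 1)
    else if cur ≠ 0 then cur :: pvRuns rest 0 else pvRuns rest 0

-- A's toggle state machine over the run table (proof-only)
def pvToggle : List Nat → Option Nat → Option Nat
  | [], od => od
  | r :: rs, od =>
    pvToggle rs (match od with
      | none => some r
      | some d => if r = d then none else some d)

-- ---- A side: the scan equals the toggle machine on the run table ----
theorem pvRuns_pos : ∀ (l : List Char) (cur : Nat), 0 < cur →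
    pvRuns l cur = (pvARun l cur).1 :: pvRuns (pvARun l cur).2 0 := by
  intro l
  induction l with
  | nil => intro cur h; simp [pvRuns, pvARun]; omega
  | cons c rest ih =>
    intro cur h
    by_cases hc : c = '`'
    · simp only [pvRuns, pvARun, if_pos hc]
      exact ih (cur + 1) (by omega)
    · simp only [pvRuns, pvARun, if_neg hc]
      have : cur ≠ 0 := by omega
      simp [this]

theorem pvALoop_eq : ∀ (m : Nat) (l : List Char), l.length ≤ m → ∀ (od : Option Nat),
    pvALoop l od = pvToggle (pvRuns l 0) od := by
  intro m
  induction m with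
  | zero =>
    intro l hl od
    have : l = [] := List.eq_nil_of_length_eq_zero (Nat.le_zero.mp hl)
    subst this; simp [pvALoop.eq_def, pvRuns, pvToggle]
  | succ m ih =>
    intro l hl od
    match l with
    | [] => simp [pvALoop.eq_def, pvRuns, pvToggle]
    | c :: rest =>
      by_cases hc : c = '`'
      · subst hc
        rw [pvALoop.eq_def]
        simp only [pvRuns, ne_eq, not_true_eq_false, if_false, if_true]
        rw [pvRuns_pos rest 1 (by omega)]
        simp only [pvToggle]
        have hlen : (pvARun rest 1).2.length ≤ m := by
          have := pvARun_len rest 1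
          simp at hl; omega
        rw [ih _ hlen]
      · rw [pvALoop.eq_def]
        simp only [pvRuns, ne_eq, hc, not_false_eq_true, if_true, if_false]
        exact ih rest (by simp at hl; omega) od

-- ---- B side, pass 1: the mask-and-split token lengths are the run table ----
theorem pvRuns_mask : ∀ (l : List Char) (k : Nat), pvRuns (pvMask l) k = pvRuns l k := by
  intro l
  induction l with
  | nil => intro k; simp [pvMask, pvRuns]
  | cons c rest ih =>
    intro k
    by_cases hc : c = '`'
    · simp [pvMask, pvRuns, hc] at ih ⊢; exact ih _
    · have hsp : (' ' : Char) ≠ '`' := by decide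
      simp only [pvMask, List.map_cons, if_neg hc, pvRuns, if_neg hsp]
      simp only [pvMask] at ih
      split <;> rw [ih]

theorem split₀_go_lens : ∀ (l cur : List Char) (acc : List (List Char)),
    (∀ c ∈ l, c = '`' ∨ (PySem.Chars.isspace c) = true) →
    (PySem.Chars.split₀.go l cur acc).map List.length
      = acc.reverse.map List.length ++ pvRuns l cur.length := by
  intro l
  induction l with
  | nil =>
    intro cur acc _
    simp only [PySem.Chars.split₀.go, pvRuns]
    by_cases h : cur.isEmpty
    · have : cur.length = 0 := by simpa [List.isEmpty_iff_length_eq_zero] using h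
      simp [h, this]
    · have : cur.length ≠ 0 := by
        simp at h; simpa using h
      simp [h, this]
  | cons c rest ih =>
    intro cur acc hall
    have hc := hall c (by simp)
    by_cases hbt : c = '`'
    · subst hbt
      have hns : PySem.Chars.isspace '`' = false := by decide
      simp only [PySem.Chars.split₀.go, hns, if_false, Bool.false_eq_true]
      rw [ih _ acc (fun x hx => hall x (by simp [hx]))]
      simp [pvRuns]
    · have hsp : PySem.Chars.isspace c = true := by
        rcases hc with h | h
        · exact absurd h hbt
        · exact h
      simp only [PySem.Chars.split₀.go, hsp, if_true]
      by_cases hemp : cur.isEmpty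
      · have h0 : cur.length = 0 := by simpa [List.isEmpty_iff_length_eq_zero] using hemp
        rw [if_pos hemp, ih [] acc (fun x hx => hall x (by simp [hx]))]
        simp [pvRuns, hbt, h0]
      · have h0 : cur.length ≠ 0 := by
          simp at hemp; simpa using hemp
        rw [if_neg hemp, ih [] (cur.reverse :: acc) (fun x hx => hall x (by simp [hx]))]
        simp [pvRuns, hbt, h0]

theorem pvTokens_eq (body : String) :
    pvTokens body = (pvRuns body.toList 0).map (fun (n : Nat) => (n : Int)) := by
  unfold pvTokens
  have hmask : ∀ c ∈ pvMask body.toList, c = '`' ∨ (PySem.Chars.isspace c) = true := by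
    intro c hc
    simp only [pvMask, List.mem_map] at hc
    obtain ⟨x, _, hx⟩ := hc
    by_cases h : x = '`'
    · left; simp [← hx, h]
    · right; rw [← hx]; simp [h]; decide
  have hlist : (PySem.Chars.split₀ (pvMask body.toList)).map List.length
      = pvRuns body.toList 0 := by
    unfold PySem.Chars.split₀
    rw [split₀_go_lens _ [] [] hmask]
    simp [pvRuns_mask]
  have hpt : ∀ p : List Char, PySem.Str.len (String.ofList p) = (p.length : Int) :=
    fun p => by simp [PySem.Str.len]
  calc (PySem.Str.split₀ (String.ofList (pvMask body.toList))).map PySem.Str.len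
      = (PySem.Chars.split₀ (pvMask body.toList)).map
          (fun p => PySem.Str.len (String.ofList p)) := by
        simp [PySem.Str.split₀, List.map_map]
    _ = ((PySem.Chars.split₀ (pvMask body.toList)).map List.length).map (fun (n : Nat) => (n : Int)) := by
        rw [List.map_map]
        exact List.map_congr_left (fun p _ => hpt p)
    _ = (pvRuns body.toList 0).map (fun (n : Nat) => (n : Int)) := by rw [hlist]

-- ---- B side, pass 2: skip-to-closer equals the toggle machine ----
theorem pvToggle_stuck : ∀ (l : List Nat) (d : Nat), d ∉ l → pvToggle l (some d) = some d := by
  intro l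
  induction l with
  | nil => intro d _; simp [pvToggle]
  | cons r rs ih =>
    intro d hd
    simp only [List.mem_cons, not_or] at hd
    have : r ≠ d := fun h => hd.1 h.symm
    simp [pvToggle, this, ih d hd.2]

theorem pvToggle_skip : ∀ (pre : List Nat) (d : Nat) (suf : List Nat), d ∉ pre →
    pvToggle (pre ++ d :: suf) (some d) = pvToggle suf none := by
  intro pre
  induction pre with
  | nil => intro d suf _; simp [pvToggle]
  | cons r rs ih =>
    intro d suf hd
    simp only [List.mem_cons, not_or] at hd
    have : r ≠ d := fun h => hd.1 h.symm
    simp only [List.cons_append, pvToggle, this]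
    exact ih d suf hd.2

theorem pvIndexCast : ∀ (rs : List Nat) (r : Nat),
    PySem.List.index? (rs.map (fun (n : Nat) => (n : Int))) ((r : Int)) = PySem.List.index? rs r := by
  intro rs r
  induction rs with
  | nil => simp [PySem.List.index?_eq_idxOf?, List.idxOf?]
  | cons x xs ihx =>
    by_cases hx : x = r
    · subst hx
      rw [List.map_cons, PySem.List.index?_cons_self, PySem.List.index?_cons_self]
    · have hxi : (x : Int) ≠ (r : Int) := by exact_mod_cast hx
      rw [List.map_cons, PySem.List.index?_cons_of_ne _ hxi,
          PySem.List.index?_cons_of_ne _ hx, ihx]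

theorem pvBLoop_eq : ∀ (m : Nat) (runs : List Nat), runs.length ≤ m →
    pvBLoop (runs.map (fun (n : Nat) => (n : Int))) = (pvToggle runs none).isSome := by
  intro m
  induction m with
  | zero =>
    intro runs h
    have : runs = [] := List.eq_nil_of_length_eq_zero (Nat.le_zero.mp h)
    subst this; simp [pvBLoop, pvToggle]
  | succ m ih =>
    intro runs h
    match runs with
    | [] => simp [pvBLoop, pvToggle]
    | r :: rs =>
      rw [pvBLoop.eq_def]
      simp only [List.map_cons, pvToggle]
      rw [pvIndexCast rs r]
      cases hfind : PySem.List.index? rs r with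
      | none =>
        have hnm : r ∉ rs := (PySem.List.index?_eq_none_iff _ _).mp hfind
        simp [pvToggle_stuck rs r hnm]
      | some k =>
        dsimp only
        obtain ⟨pre, suf, hsplit, hlen, hnm⟩ := (PySem.List.index?_eq_some_iff _ _ _).mp hfind
        have hslice : PySem.List.slice (rs.map (fun (n : Nat) => (n : Int))) (some ((k : Int) + 1)) none
            = (rs.drop (k + 1)).map (fun (n : Nat) => (n : Int)) := by
          rw [PySem.List.slice_from _ (by omega)]
          have : (((k : Int) + 1)).toNat = k + 1 := by omega
          rw [this, List.map_drop]
        rw [hslice]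
        have hdrop : rs.drop (k + 1) = suf := by
          subst hsplit hlen
          simpa using List.drop_append (l₁ := pre) (l₂ := r :: suf) 1
        rw [hdrop]
        have hsuf : suf.length ≤ m := by
          subst hsplit
          simp at h; omega
        rw [ih suf hsuf, hsplit, pvToggle_skip pre r suf hnm]

-- ===== VERDICT (by name: the statement is the Claim_ definition above) =====
theorem has_unmatched_backticks_py_spec : Claim_equal_has_unmatched_backticks_py := by
  intro body _
  unfold Spec_has_unmatched_backticks_py has_unmatched_backticks_py has_unmatched_backticks_py_alt
  rw [pvALoop_eq body.toList.length body.toList (Nat.le_refl _) none,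
      pvTokens_eq body,
      pvBLoop_eq (pvRuns body.toList 0).length _ (Nat.le_refl _)]
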